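-- pv_equiv track=rewrite | github.com/carsonmiiller/577 | HW04/source_file.py | furthest
-- ===== SOURCE A (Python) =====
-- def furthest(cache, future_requests):
--     furthest = cache[0]
--
--     # find page in cache that's furthest away in future requests
--     for i in range(len(cache)):
--         if cache[i] in future_requests:
--             try:
--                 if future_requests.index(cache[i]) > future_requests.index(furthest):
--                     furthest = cache[i]
--             except:
--                 pass
--         else:
--             return cache[i]
--     return furthest
-- ===== SOURCE B (Python) =====
-- def furthest(cache, future_requests):
--     cache_set = set(cache)
--     seen = set()
--     last = cache[0]
--     for r in future_requests:
--         if r in cache_set and r not in seen: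
--             seen.add(r)
--             last = r
--     for c in cache:
--         if c not in seen:
--             return c
--     return last
-- ===== Notes on version B (the rewrite author's own statement) =====
-- stated objective: alternative
-- what changed: Instead of scanning cache and calling future_requests.index twice per element (each a linear scan), B makes one forward pass over future_requests maintaining a seen-set and the latest first-appearing cache page, then one pass over cache to return the first never-requested page or that latest page.
import Mathlib
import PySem

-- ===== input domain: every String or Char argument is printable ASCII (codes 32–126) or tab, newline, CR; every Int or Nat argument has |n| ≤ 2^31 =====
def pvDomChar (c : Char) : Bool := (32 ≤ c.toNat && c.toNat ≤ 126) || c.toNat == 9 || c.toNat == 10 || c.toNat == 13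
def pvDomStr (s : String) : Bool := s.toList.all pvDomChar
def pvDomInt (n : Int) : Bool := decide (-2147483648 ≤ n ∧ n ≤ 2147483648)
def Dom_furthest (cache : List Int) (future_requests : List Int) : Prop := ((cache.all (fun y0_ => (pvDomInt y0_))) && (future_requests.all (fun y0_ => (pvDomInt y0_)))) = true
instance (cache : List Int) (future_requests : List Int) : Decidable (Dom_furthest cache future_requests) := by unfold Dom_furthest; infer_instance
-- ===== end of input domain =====

-- B replaces A's per-cache-page .index scans by one forward pass over future_requests
-- with a seen-set, then one pass over cache (objective: alternative algorithm).

-- ===== PORT A =====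
-- the 'for i in range(len(cache))' loop: early return on a page not in future_requests
def furthestLoopA (fr : List Int) : List Int → Int → Int
  | [], f => f
  | c :: rest, f =>
    if fr.contains c then
      furthestLoopA fr rest
        (match PySem.List.index? fr c, PySem.List.index? fr f with
         | some ic, some imf => if ic > imf then c else f   -- try: compare .index
         | _, _ => f)                                       -- except: pass
    else c

def furthest (cache : List Int) (future_requests : List Int) : Int :=
  furthestLoopA future_requests cache ((PySem.List.pyGet? cache 0).getD 0)

-- ===== PORT B =====
-- second loop of B: first cache page not in seen, else last
def firstUnseenB (seen : PySem.Set Int) (last : Int) : List Int → Int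
  | [] => last
  | c :: rest => if !(PySem.Set.contains seen c) then c else firstUnseenB seen last rest

def furthest_alt (cache : List Int) (future_requests : List Int) : Int :=
  let cacheSet : PySem.Set Int := PySem.Set.ofList cache
  let st := future_requests.foldl
    (fun (st : PySem.Set Int × Int) r =>
      if PySem.Set.contains cacheSet r && !(PySem.Set.contains st.1 r)
      then (PySem.Set.add st.1 r, r) else st)
    (PySem.Set.empty, (PySem.List.pyGet? cache 0).getD 0)
  firstUnseenB st.1 st.2 cache

-- ===== PRECONDITION & SPEC =====
-- A raises IndexError on cache[0] when cache is empty (and so does B); excluded.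
def Pre_furthest (cache : List Int) (future_requests : List Int) : Prop := cache ≠ []
instance (cache : List Int) (future_requests : List Int) : Decidable (Pre_furthest cache future_requests) := by unfold Pre_furthest; infer_instance
def pvWitness_furthest : List Int × List Int := ([1, 2], [2, 1, 3])

def Spec_furthest (cache : List Int) (future_requests : List Int) (out : Int) : Prop := out = furthest_alt cache future_requests
instance (cache : List Int) (future_requests : List Int) (out : Int) : Decidable (Spec_furthest cache future_requests out) := by unfold Spec_furthest; infer_instance

-- ===== CLAIM (what is proved, stated in full; the proofs are below) =====
def Claim_equal_furthest : Prop := ∀ (cache : List Int) (future_requests : List Int), Dom_furthest cache future_requests → Pre_furthest cache future_requests → Spec_furthest cache future_requests (furthest cache future_requests)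

-- ===== LEMMAS AND PROOFS =====

-- index? is injective on indices: same first index, same value
lemma index?_inj {fr : List Int} {a b : Int} {i : Nat}
    (ha : PySem.List.index? fr a = some i) (hb : PySem.List.index? fr b = some i) : a = b := by
  obtain ⟨hi, hfa, -⟩ := PySem.List.getElem_of_index?_eq_some ha
  obtain ⟨hi', hfb, -⟩ := PySem.List.getElem_of_index?_eq_some hb
  rw [← hfa, ← hfb]

lemma index?_lt_length {l : List Int} {x : Int} {i : Nat}
    (h : PySem.List.index? l x = some i) : i < l.length := by
  obtain ⟨hi, -, -⟩ := PySem.List.getElem_of_index?_eq_some h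
  exact hi

-- A's loop: result is among the candidates, is in fr, and has maximal first index
lemma loopA_max (fr : List Int) : ∀ (l : List Int) (f : Int), (∀ c ∈ l, c ∈ fr) → f ∈ fr →
    ((furthestLoopA fr l f = f ∨ furthestLoopA fr l f ∈ l) ∧ furthestLoopA fr l f ∈ fr ∧
      (∀ x, (x = f ∨ x ∈ l) → ∀ i j, PySem.List.index? fr x = some i →
        PySem.List.index? fr (furthestLoopA fr l f) = some j → i ≤ j)) := by
  intro l
  induction l with
  | nil =>
    intro f _ hf
    refine ⟨Or.inl rfl, by simpa [furthestLoopA] using hf, ?_⟩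
    intro x hx i j hxi hj
    simp only [furthestLoopA] at hj
    rcases hx with rfl | h
    · rw [hxi] at hj; injection hj with h'; omega
    · simp at h
  | cons c rest ih =>
    intro f hl hf
    have hc : c ∈ fr := hl c (by simp)
    obtain ⟨ic, hic⟩ := Option.isSome_iff_exists.mp ((PySem.List.index?_isSome_iff fr c).mpr hc)
    obtain ⟨imf, himf⟩ := Option.isSome_iff_exists.mp ((PySem.List.index?_isSome_iff fr f).mpr hf)
    have hcc : fr.contains c = true := List.contains_iff_mem.mpr hc
    have hstep : furthestLoopA fr (c :: rest) f =
        furthestLoopA fr rest (if imf < ic then c else f) := by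
      simp only [furthestLoopA, hcc, if_true, hic, himf]
    set f' : Int := if imf < ic then c else f with hf'def
    have hf' : f' ∈ fr := by rw [hf'def]; split <;> assumption
    have hrest : ∀ x ∈ rest, x ∈ fr := fun x hx => hl x (by simp [hx])
    obtain ⟨ihmem, ihfr, ihmax⟩ := ih f' hrest hf'
    have hkey : ∀ x : Int, (x = f ∨ x = c) → ∀ i, PySem.List.index? fr x = some i →
        ∃ k, PySem.List.index? fr f' = some k ∧ i ≤ k := by
      intro x hx i hxi
      by_cases hlt : imf < ic
      · have hf'c : PySem.List.index? fr f' = some ic := by rw [hf'def, if_pos hlt]; exact hic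
        refine ⟨ic, hf'c, ?_⟩
        rcases hx with rfl | rfl
        · rw [hxi] at himf; injection himf with h'; omega
        · rw [hxi] at hic; injection hic with h'; omega
      · have hf'c : PySem.List.index? fr f' = some imf := by rw [hf'def, if_neg hlt]; exact himf
        refine ⟨imf, hf'c, ?_⟩
        rcases hx with rfl | rfl
        · rw [hxi] at himf; injection himf with h'; omega
        · rw [hxi] at hic; injection hic with h'; omega
    refine ⟨?_, ?_, ?_⟩
    · rw [hstep]
      rcases ihmem with h | h
      · rw [h, hf'def]; split
        · exact Or.inr (by simp)
        · exact Or.inl rfl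
      · exact Or.inr (by simp [h])
    · rw [hstep]; exact ihfr
    · intro x hx i j hxi hj
      rw [hstep] at hj
      rcases hx with rfl | hx
      · obtain ⟨k, hk, hik⟩ := hkey x (Or.inl rfl) i hxi
        exact le_trans hik (ihmax f' (Or.inl rfl) k j hk hj)
      · rcases List.mem_cons.mp hx with rfl | hx
        · obtain ⟨k, hk, hik⟩ := hkey x (Or.inr rfl) i hxi
          exact le_trans hik (ihmax f' (Or.inl rfl) k j hk hj)
        · exact ihmax x (Or.inr hx) i j hxi hj

-- A's loop returns the first cache page not in fr
lemma loopA_first_notin (fr : List Int) {c : Int} (hc : c ∉ fr) :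
    ∀ (p s : List Int) (f : Int), (∀ x ∈ p, x ∈ fr) →
      furthestLoopA fr (p ++ c :: s) f = c := by
  intro p
  induction p with
  | nil =>
    intro s f _
    simp [furthestLoopA, hc]
  | cons x p' ih =>
    intro s f hp
    have hx : fr.contains x = true := List.contains_iff_mem.mpr (hp x (by simp))
    simp only [List.cons_append, furthestLoopA, hx, if_true]
    exact ih s _ (fun y hy => hp y (by simp [hy]))

-- B's fold: the seen set holds exactly the cache pages occurring in the processed part
lemma foldB_seen (cache : List Int) : ∀ (l : List Int) (seen : PySem.Set Int) (last : Int),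
    (∀ x : Int, x ∈ (l.foldl
      (fun (st : PySem.Set Int × Int) r =>
        if PySem.Set.contains (PySem.Set.ofList cache) r && !(PySem.Set.contains st.1 r)
        then (PySem.Set.add st.1 r, r) else st) (seen, last)).1 ↔
      (x ∈ seen ∨ (x ∈ l ∧ x ∈ cache))) := by
  intro l
  induction l with
  | nil => intro seen last x; simp
  | cons r rest ih =>
    intro seen last x
    simp only [List.foldl_cons]
    by_cases hb : (PySem.Set.contains (PySem.Set.ofList cache) r && !(PySem.Set.contains seen r)) = true
    · have hr : r ∈ cache := by
        have h1 := ((Bool.and_eq_true _ _).mp hb).1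
        exact (PySem.Set.mem_ofList cache r).mp ((PySem.Set.contains_iff _ r).mp h1)
      rw [if_pos hb, ih (PySem.Set.add seen r) r x]
      simp only [PySem.Set.mem_add, List.mem_cons]
      constructor
      · intro h; rcases h with (h | h) | h <;> subst_eqs <;> tauto
      · intro h; rcases h with h | ⟨h1 | h1, h2⟩ <;> subst_eqs <;> tauto
    · have himp : r ∈ cache → r ∈ seen := by
        intro hrc
        by_contra hrs
        apply hb
        simp only [Bool.and_eq_true, Bool.not_eq_true']
        refine ⟨(PySem.Set.contains_iff _ r).mpr ((PySem.Set.mem_ofList cache r).mpr hrc), ?_⟩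
        cases hcr : PySem.Set.contains seen r
        · rfl
        · exact absurd ((PySem.Set.contains_iff seen r).mp hcr) hrs
      rw [if_neg hb, ih seen last x]
      simp only [List.mem_cons]
      constructor
      · intro h; tauto
      · intro h; rcases h with h | ⟨h1 | h1, h2⟩ <;> subst_eqs <;> tauto

-- B's fold: the tracked page is a cache page in F with maximal first index
lemma foldB_last (cache F : List Int) : ∀ (l p : List Int) (seen : PySem.Set Int) (last : Int),
    F = p ++ l →
    (∀ x : Int, x ∈ seen ↔ (x ∈ p ∧ x ∈ cache)) →
    last ∈ cache → last ∈ F →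
    (∀ x ∈ p, x ∈ cache → ∀ i j, PySem.List.index? F x = some i →
      PySem.List.index? F last = some j → i ≤ j) →
    (let st := l.foldl
      (fun (st : PySem.Set Int × Int) r =>
        if PySem.Set.contains (PySem.Set.ofList cache) r && !(PySem.Set.contains st.1 r)
        then (PySem.Set.add st.1 r, r) else st) (seen, last)
     st.2 ∈ cache ∧ st.2 ∈ F ∧
      (∀ x ∈ F, x ∈ cache → ∀ i j, PySem.List.index? F x = some i →
        PySem.List.index? F st.2 = some j → i ≤ j)) := by
  intro l
  induction l with
  | nil =>
    intro p seen last hF hseen hlc hlF hmax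
    subst hF
    simp only [List.foldl_nil, List.append_nil] at *
    exact ⟨hlc, hlF, fun x hx => hmax x hx⟩
  | cons r rest ih =>
    intro p seen last hF hseen hlc hlF hmax
    simp only [List.foldl_cons]
    by_cases hb : (PySem.Set.contains (PySem.Set.ofList cache) r && !(PySem.Set.contains seen r)) = true
    · obtain ⟨hb1, hb2⟩ := (Bool.and_eq_true _ _).mp hb
      have hrc : r ∈ cache := (PySem.Set.mem_ofList cache r).mp ((PySem.Set.contains_iff _ r).mp hb1)
      have hrs : r ∉ seen := by
        intro h'
        rw [(PySem.Set.contains_iff seen r).mpr h'] at hb2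
        simp at hb2
      have hrp : r ∉ p := fun h' => hrs ((hseen r).mpr ⟨h', hrc⟩)
      have hidxr : PySem.List.index? F r = some p.length :=
        (PySem.List.index?_eq_some_iff F r p.length).mpr ⟨p, rest, hF, rfl, hrp⟩
      rw [if_pos hb]
      refine ih (p ++ [r]) (PySem.Set.add seen r) r (by simp [hF]) ?_ hrc (by simp [hF]) ?_
      · intro x
        rw [PySem.Set.mem_add]
        constructor
        · rintro (h | rfl)
          · obtain ⟨h1, h2⟩ := (hseen x).mp h
            exact ⟨by simp [h1], h2⟩
          · exact ⟨by simp, hrc⟩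
        · rintro ⟨h1, h2⟩
          rcases (List.mem_append.mp h1) with h1 | h1
          · exact Or.inl ((hseen x).mpr ⟨h1, h2⟩)
          · exact Or.inr (by simpa using h1)
      · intro x hx hxc i j hxi hj
        rw [hidxr] at hj
        injection hj with hj'
        rcases List.mem_append.mp hx with hxp | hxr
        · have : PySem.List.index? F x = PySem.List.index? p x := by
            rw [hF]; exact PySem.List.index?_append_of_mem _ hxp
          rw [this] at hxi
          have := index?_lt_length hxi
          omega
        · have hxr' : x = r := by simpa using hxr
          rw [hxr', hidxr] at hxi
          injection hxi with h'
          omega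
    · have himp : r ∈ cache → r ∈ seen := by
        intro hrc
        by_contra hrs
        apply hb
        simp only [Bool.and_eq_true, Bool.not_eq_true']
        refine ⟨(PySem.Set.contains_iff _ r).mpr ((PySem.Set.mem_ofList cache r).mpr hrc), ?_⟩
        cases hcr : PySem.Set.contains seen r
        · rfl
        · exact absurd ((PySem.Set.contains_iff seen r).mp hcr) hrs
      rw [if_neg hb]
      refine ih (p ++ [r]) seen last (by simp [hF]) ?_ hlc hlF ?_
      · intro x
        rw [hseen x]
        constructor
        · rintro ⟨h1, h2⟩; exact ⟨by simp [h1], h2⟩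
        · rintro ⟨h1, h2⟩
          rcases List.mem_append.mp h1 with h1 | h1
          · exact ⟨h1, h2⟩
          · have : x = r := by simpa using h1
            subst this
            exact ⟨(hseen x).mp (himp h2) |>.1, h2⟩
      · intro x hx hxc i j hxi hj
        rcases List.mem_append.mp hx with hxp | hxr
        · exact hmax x hxp hxc i j hxi hj
        · have : x = r := by simpa using hxr
          subst this
          have hxp : x ∈ p := ((hseen x).mp (himp hxc)).1
          exact hmax x hxp hxc i j hxi hj

lemma firstUnseenB_all {seen : PySem.Set Int} {last : Int} {l : List Int}
    (h : ∀ c ∈ l, c ∈ seen) : firstUnseenB seen last l = last := by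
  induction l with
  | nil => rfl
  | cons c rest ih =>
    have hc : PySem.Set.contains seen c = true := (PySem.Set.contains_iff seen c).mpr (h c (by simp))
    simp only [firstUnseenB, hc, Bool.not_true, Bool.false_eq_true, if_false]
    exact ih (fun x hx => h x (by simp [hx]))

lemma firstUnseenB_first {seen : PySem.Set Int} {last : Int} {c : Int} (hc : c ∉ seen) :
    ∀ (p s : List Int), (∀ x ∈ p, x ∈ seen) → firstUnseenB seen last (p ++ c :: s) = c := by
  intro p
  induction p with
  | nil =>
    intro s _
    simp [firstUnseenB, hc]
  | cons x p' ih =>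
    intro s hp
    have hx : PySem.Set.contains seen x = true := (PySem.Set.contains_iff seen x).mpr (hp x (by simp))
    simp only [List.cons_append, firstUnseenB, hx, Bool.not_true, Bool.false_eq_true, if_false]
    exact ih s (fun y hy => hp y (by simp [hy]))

lemma exists_first_notin (fr : List Int) : ∀ (l : List Int), (¬ ∀ c ∈ l, c ∈ fr) →
    ∃ p c s, l = p ++ c :: s ∧ (∀ x ∈ p, x ∈ fr) ∧ c ∉ fr := by
  intro l
  induction l with
  | nil => intro h; exact absurd (by simp) h
  | cons a t ih =>
    intro h
    by_cases ha : a ∈ fr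
    · have ht : ¬ ∀ c ∈ t, c ∈ fr := by
        intro h'
        exact h (by intro c hc; rcases List.mem_cons.mp hc with rfl | hc; exacts [ha, h' c hc])
      obtain ⟨p, c, s, h1, h2, h3⟩ := ih ht
      exact ⟨a :: p, c, s, by simp [h1], by
        intro x hx; rcases List.mem_cons.mp hx with rfl | hx; exacts [ha, h2 x hx], h3⟩
    · exact ⟨[], a, t, rfl, by simp, ha⟩

-- ===== VERDICT (by name: the statement is the Claim_ definition above) =====
theorem furthest_spec : Claim_equal_furthest := by
  intro cache fr _ hpre
  unfold Spec_furthest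
  obtain ⟨c0, rest, rfl⟩ : ∃ c0 rest, cache = c0 :: rest := by
    cases cache with
    | nil => exact absurd rfl hpre
    | cons a t => exact ⟨a, t, rfl⟩
  have h0 : (PySem.List.pyGet? (c0 :: rest) (0 : Int)).getD 0 = c0 := by
    simp [PySem.List.pyGet?, PySem.List.pyIdx?]
  rw [furthest, furthest_alt, h0]
  set step := fun (st : PySem.Set Int × Int) r =>
    if PySem.Set.contains (PySem.Set.ofList (c0 :: rest)) r && !(PySem.Set.contains st.1 r)
    then (PySem.Set.add st.1 r, r) else st with hstep
  set st := fr.foldl step (PySem.Set.empty, c0) with hst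
  have hseen : ∀ x : Int, x ∈ st.1 ↔ (x ∈ fr ∧ x ∈ c0 :: rest) := by
    intro x
    rw [hst, hstep]
    rw [foldB_seen (c0 :: rest) fr PySem.Set.empty c0 x]
    simp [PySem.Set.empty]
  by_cases hall : ∀ c ∈ c0 :: rest, c ∈ fr
  · -- every cache page occurs in future_requests: both return the max-first-index page
    have hB : firstUnseenB st.1 st.2 (c0 :: rest) = st.2 :=
      firstUnseenB_all (fun c hc => (hseen c).mpr ⟨hall c hc, hc⟩)
    obtain ⟨hL1, hL2, hL3⟩ := foldB_last (c0 :: rest) fr fr [] PySem.Set.empty c0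
      rfl (by simp [PySem.Set.empty]) (by simp) (hall c0 (by simp)) (by simp)
    obtain ⟨hA1, hA2, hA3⟩ := loopA_max fr (c0 :: rest) c0 hall (hall c0 (by simp))
    set R := furthestLoopA fr (c0 :: rest) c0 with hR
    have hAc : R ∈ c0 :: rest := by
      rcases hA1 with h | h
      · rw [h]; simp
      · exact h
    obtain ⟨iR, hiR⟩ := Option.isSome_iff_exists.mp ((PySem.List.index?_isSome_iff fr R).mpr hA2)
    obtain ⟨iL, hiL⟩ := Option.isSome_iff_exists.mp ((PySem.List.index?_isSome_iff fr st.2).mpr hL2)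
    have h1 : iL ≤ iR := hA3 st.2 (Or.inr hL1) iL iR hiL hiR
    have h2 : iR ≤ iL := hL3 R hA2 hAc iR iL hiR hiL
    have : iR = iL := le_antisymm h2 h1
    rw [hB]
    exact index?_inj hiR (this ▸ hiL)
  · -- some cache page never occurs again: both return the first such page
    obtain ⟨p, c, s, hdec, hp, hc⟩ := exists_first_notin fr (c0 :: rest) hall
    rw [hdec]
    rw [loopA_first_notin fr hc p s _ hp]
    rw [firstUnseenB_first (by rw [hseen]; tauto) p s
      (fun x hx => (hseen x).mpr ⟨hp x hx, by rw [hdec]; simp [hx]⟩)]
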